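-- pv_equiv track=rewrite | github.com/mykhalko/computer_graphics_3 | legacy_tools.py | with_neighbour
-- ===== SOURCE A (Python) =====
-- def with_neighbour(array, last_with_first=True):
--     iterator = iter(array)
--     first = current = next(iterator)
--     is_executed = False
--     while True:
--         try:
--             prev, current = current, next(iterator)
--         except StopIteration:
--             is_executed = True
--             if last_with_first:
--                 yield current, first
--         else:
--             yield prev, current
--         if is_executed:
--             return
-- ===== SOURCE B (Python) =====
-- def with_neighbour(array, last_with_first=True):
--     it = iter(array)
--     first = next(it)          # empty input: StopIteration -> RuntimeError, as in A
--     items = [first]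
--     items.extend(it)
--     for i in range(1, len(items)):
--         yield items[i - 1], items[i]
--     if last_with_first:
--         yield items[-1], first
-- ===== Notes on version B (the rewrite author's own statement) =====
-- stated objective: simpler
-- what changed: B materialises the iterator into a list once and yields index pairs (items[i-1], items[i]) over range(1, len), plus the wrap pair at the end, instead of A's prev/current streaming loop with try/except StopIteration and the is_executed flag.
import Mathlib
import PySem

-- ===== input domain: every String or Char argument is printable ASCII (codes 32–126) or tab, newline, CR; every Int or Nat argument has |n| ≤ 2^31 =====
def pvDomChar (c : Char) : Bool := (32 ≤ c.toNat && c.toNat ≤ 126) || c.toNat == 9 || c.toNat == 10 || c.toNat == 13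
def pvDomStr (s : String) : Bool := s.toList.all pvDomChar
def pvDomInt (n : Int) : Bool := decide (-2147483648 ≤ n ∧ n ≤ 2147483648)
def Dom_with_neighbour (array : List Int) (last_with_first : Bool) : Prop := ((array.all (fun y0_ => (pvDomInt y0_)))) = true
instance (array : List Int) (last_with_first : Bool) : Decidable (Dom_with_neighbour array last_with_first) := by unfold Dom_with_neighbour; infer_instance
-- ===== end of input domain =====

-- B replaces A's prev/current streaming loop + try/except with an eagerly built list and
-- indexed pairing (objective: simpler). Both are generators in Python; equivalence is about
-- the list of yielded pairs.

-- ===== PORT A =====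
-- A's while-loop: state is (first, current); each step pulls the next element or, at
-- StopIteration, emits the wrap pair if requested.
def withNeighbourLoop (first current : Int) (rest : List Int) (last_with_first : Bool) :
    List (Int × Int) :=
  match rest with
  | [] => if last_with_first then [(current, first)] else []
  | x :: xs => (current, x) :: withNeighbourLoop first x xs last_with_first

def with_neighbour (array : List Int) (last_with_first : Bool) : List (Int × Int) :=
  match array with
  | [] => []  -- next(iterator) raises here (RuntimeError); excluded by Pre_
  | f :: rest => withNeighbourLoop f f rest last_with_first

-- ===== PORT B =====
def with_neighbour_alt (array : List Int) (last_with_first : Bool) : List (Int × Int) :=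
  match array with
  | [] => []  -- next(it) raises here (RuntimeError); excluded by Pre_
  | first :: _ =>
    let items := array
    let pairs := (PySem.List.pyRange 1 (items.length : Int) 1).map
      (fun i => (PySem.List.pyGetD items (i - 1) 0, PySem.List.pyGetD items i 0))
    if last_with_first then pairs ++ [(PySem.List.pyGetD items (-1) 0, first)] else pairs

-- ===== PRECONDITION & SPEC =====
-- Both A and B raise RuntimeError (StopIteration from the initial next) on the empty list.
def Pre_with_neighbour (array : List Int) (last_with_first : Bool) : Prop := array ≠ []
instance (array : List Int) (last_with_first : Bool) : Decidable (Pre_with_neighbour array last_with_first) := by unfold Pre_with_neighbour; infer_instance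
def pvWitness_with_neighbour : List Int × Bool := ([1, 2, 3], true)

def Spec_with_neighbour (array : List Int) (last_with_first : Bool) (out : List (Int × Int)) : Prop := out = with_neighbour_alt array last_with_first
instance (array : List Int) (last_with_first : Bool) (out : List (Int × Int)) : Decidable (Spec_with_neighbour array last_with_first out) := by unfold Spec_with_neighbour; infer_instance

-- ===== CLAIM (what is proved, stated in full; the proofs are below) =====
def Claim_equal_with_neighbour : Prop := ∀ (array : List Int) (last_with_first : Bool), Dom_with_neighbour array last_with_first → Pre_with_neighbour array last_with_first → Spec_with_neighbour array last_with_first (with_neighbour array last_with_first)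

-- ===== LEMMAS AND PROOFS =====

/-- Adjacent pairs of a list: the common value both programs compute. -/
def adjPairs : List Int → List (Int × Int)
  | a :: b :: t => (a, b) :: adjPairs (b :: t)
  | _ => []

theorem withNeighbourLoop_eq (first : Int) (last_with_first : Bool) :
    ∀ (rest : List Int) (c : Int) (h : (c :: rest) ≠ []),
      withNeighbourLoop first c rest last_with_first =
        adjPairs (c :: rest) ++
          (if last_with_first then [((c :: rest).getLast h, first)] else []) := by
  intro rest
  induction rest with
  | nil => intro c h; simp [withNeighbourLoop, adjPairs]
  | cons x xs ih =>
      intro c h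
      have hih := ih x (by simp)
      simp only [withNeighbourLoop, adjPairs, hih, List.getLast_cons_cons, List.cons_append]

theorem adjPairs_eq_map_range :
    ∀ (items : List Int),
      (List.range (items.length - 1)).map
          (fun k => (items.getD k 0, items.getD (k + 1) 0)) = adjPairs items := by
  intro items
  match items with
  | [] => simp [adjPairs]
  | [a] => simp [adjPairs]
  | a :: b :: t =>
      have : (a :: b :: t).length - 1 = (b :: t).length - 1 + 1 := by simp
      rw [this, List.range_succ_eq_map, List.map_cons, List.map_map]
      simp only [List.getD_cons_zero, List.getD_cons_succ, Function.comp]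
      exact congrArg (fun l => (a, b) :: l) (adjPairs_eq_map_range (b :: t))

theorem pairs_map_eq_adjPairs (items : List Int) :
    (PySem.List.pyRange 1 (items.length : Int) 1).map
        (fun i => (PySem.List.pyGetD items (i - 1) 0, PySem.List.pyGetD items i 0)) =
      adjPairs items := by
  rw [PySem.List.pyRange_one, List.map_map]
  have hn : ((items.length : Int) - 1).toNat = items.length - 1 := by omega
  rw [hn, ← adjPairs_eq_map_range items]
  apply List.map_congr_left
  intro k _
  have h1 : (1 : Int) + (k : Int) - 1 = ((k : Nat) : Int) := by push_cast; ring
  have h2 : (1 : Int) + (k : Int) = (((k + 1 : Nat)) : Int) := by push_cast; ring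
  simp only [Function.comp]
  rw [h1, h2]
  simp only [PySem.List.pyGetD_natCast]

-- ===== VERDICT (by name: the statement is the Claim_ definition above) =====
theorem with_neighbour_spec : Claim_equal_with_neighbour := by
  intro array last_with_first _ hpre
  unfold Spec_with_neighbour
  match array with
  | [] => exact absurd rfl hpre
  | f :: rest =>
      show withNeighbourLoop f f rest last_with_first = _
      rw [withNeighbourLoop_eq f last_with_first rest f (by simp)]
      unfold with_neighbour_alt
      simp only
      rw [pairs_map_eq_adjPairs, PySem.List.pyGetD_neg_one (f :: rest) 0 (by simp)]
      cases last_with_first <;> simp
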